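-- pv_equiv track=rewrite | github.com/AshishSalaskar1/DS_Algo_Playground | Track/DSA_A_to_Z/Bit Manipulation/Flip_bits_to_make_AorB_C.py | minFlips2
-- ===== SOURCE A (Python) =====
-- def minFlips2(a: int, b: int, c: int) -> int:
--     flips = 0
--     for i in range(31):
--         # i'th bit of c is 1
--         if (c >> i) & 1:
--             flips += ((a >> i) & 1) == 0 and ((b >> i) & 1) == 0
--         # i'th bit of c is 0
--         else:
--             flips += (a >> i) & 1
--             flips += (b >> i) & 1
--     return flips
-- ===== SOURCE B (Python) =====
-- def _popcount(x):
--     return bin(x).count("1")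
--
-- def minFlips2(a: int, b: int, c: int) -> int:
--     mask = (1 << 31) - 1
--     return (_popcount(a & ~c & mask)
--             + _popcount(b & ~c & mask)
--             + _popcount(~a & ~b & c & mask))
-- ===== Notes on version B (the rewrite author's own statement) =====
-- stated objective: simpler
-- what changed: Replaces the 31-iteration per-bit loop by three masked bitwise expressions whose popcounts (a&~c, b&~c, ~a&~b&c, each masked to 31 bits) are summed, removing the loop and branch entirely.
import Mathlib
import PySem

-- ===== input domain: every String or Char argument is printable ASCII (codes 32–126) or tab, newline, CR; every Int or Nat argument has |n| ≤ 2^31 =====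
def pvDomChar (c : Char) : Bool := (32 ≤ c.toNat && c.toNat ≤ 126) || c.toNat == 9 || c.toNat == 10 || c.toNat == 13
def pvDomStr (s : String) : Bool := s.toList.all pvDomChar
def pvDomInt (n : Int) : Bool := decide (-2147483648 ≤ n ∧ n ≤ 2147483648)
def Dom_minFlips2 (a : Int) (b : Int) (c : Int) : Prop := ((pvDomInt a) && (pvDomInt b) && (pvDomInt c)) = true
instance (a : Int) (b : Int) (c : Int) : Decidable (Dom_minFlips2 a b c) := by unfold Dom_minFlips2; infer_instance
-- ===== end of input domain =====

-- B replaces A's 31-iteration bit loop by three 31-bit-masked bitwise expressions and their popcounts (simpler); the return values agree on all inputs.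

-- ===== PORT A =====
-- literal port of A's loop: for i in range(31), branch on (c >> i) & 1 (Python truthiness = ≠ 0);
-- Int.land / >>> are exact for Python's & / >> on ints (two's complement and / arithmetic shift).
def minFlips2 (a : Int) (b : Int) (c : Int) : Int :=
  (PySem.List.pyRange 0 31 1).foldl
    (fun flips i =>
      if ((c >>> i).land 1) ≠ 0 then
        flips + (if ((a >>> i).land 1) = 0 ∧ ((b >>> i).land 1) = 0 then 1 else 0)
      else
        flips + ((a >>> i).land 1) + ((b >>> i).land 1))
    0

-- ===== PORT B =====
-- port of Source B's _popcount (bin(x).count("1"), applied to nonnegative values only): count set bits by halving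
def pyPopCount : Nat → Nat
  | 0 => 0
  | n + 1 => (n + 1) % 2 + pyPopCount ((n + 1) / 2)
decreasing_by exact Nat.div_lt_self (Nat.succ_pos n) one_lt_two

-- Int.land / Int.lnot are exact for Python's & / ~ on ints (two's complement)
def minFlips2_alt (a : Int) (b : Int) (c : Int) : Int :=
  let mask : Int := (1 <<< (31 : Int)) - 1
  (pyPopCount ((a.land c.lnot).land mask).toNat : Int)
  + (pyPopCount ((b.land c.lnot).land mask).toNat : Int)
  + (pyPopCount (((a.lnot.land b.lnot).land c).land mask).toNat : Int)

-- ===== PRECONDITION & SPEC =====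
def Spec_minFlips2 (a : Int) (b : Int) (c : Int) (out : Int) : Prop := out = minFlips2_alt a b c
instance (a : Int) (b : Int) (c : Int) (out : Int) : Decidable (Spec_minFlips2 a b c out) := by unfold Spec_minFlips2; infer_instance

-- ===== CLAIM (what is proved, stated in full; the proofs are below) =====
def Claim_equal_minFlips2 : Prop := ∀ (a : Int) (b : Int) (c : Int), Dom_minFlips2 a b c → Spec_minFlips2 a b c (minFlips2 a b c)

-- ===== LEMMAS AND PROOFS =====

-- `x & 1` on an integer is the 0/1 value of its low bit
theorem int_land_one (y : Int) : y.land 1 = if y.testBit 0 then 1 else 0 := by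
  cases y with
  | ofNat m =>
    show (Int.ofNat (m &&& 1)) = _
    rw [Nat.and_one_is_mod]
    have : (Int.ofNat m).testBit 0 = m.testBit 0 := rfl
    rw [this, Nat.testBit_zero]
    rcases Nat.mod_two_eq_zero_or_one m with h | h <;> simp [h]
  | negSucc m =>
    show (Int.ofNat (Nat.ldiff 1 m)) = _
    have hb : ∀ i, (Nat.ldiff 1 m).testBit i = (Nat.testBit 1 i && !(m.testBit i)) :=
      fun i => Nat.testBit_ldiff 1 m i
    have h1 : ∀ i, 1 ≤ i → Nat.testBit 1 i = false := by
      intro i hi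
      have : (1:Nat) < 2 ^ i := by
        calc (1:Nat) < 2 ^ 1 := by norm_num
        _ ≤ 2 ^ i := Nat.pow_le_pow_right (by norm_num) hi
      exact Nat.testBit_lt_two_pow this
    have hlt : Nat.ldiff 1 m < 2 := by
      have := Nat.lt_pow_two_of_testBit (n := 1) (Nat.ldiff 1 m) (by
        intro i hi
        rw [hb i, h1 i hi]; rfl)
      simpa using this
    have hbit0 : (Nat.ldiff 1 m).testBit 0 = !(m.testBit 0) := by
      rw [hb 0]; rfl
    have hts : (Int.negSucc m).testBit 0 = !(m.testBit 0) := rfl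
    rw [hts, ← hbit0]
    have h01 : Nat.ldiff 1 m = 0 ∨ Nat.ldiff 1 m = 1 := by omega
    rcases h01 with h | h <;> rw [h] <;> simp

-- right shift by a natural number moves bit k + j to bit j (both on ℕ and on negative ints)
theorem int_testBit_shiftRight (x : Int) (k j : Nat) :
    (x >>> ((k : Nat) : Int)).testBit j = x.testBit (k + j) := by
  cases x with
  | ofNat m =>
    rw [show (Int.ofNat m) = ((m : Nat) : Int) from rfl, Int.shiftRight_natCast]
    show (m >>> k).testBit j = m.testBit (k + j)
    rw [Nat.testBit_shiftRight]
  | negSucc m =>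
    rw [Int.shiftRight_negSucc]
    show (!(m >>> k).testBit j) = (!(m.testBit (k + j)))
    rw [Nat.testBit_shiftRight]

-- `(x >> k) & 1` is the 0/1 value of bit k
theorem shift_land_one (x : Int) (k : Nat) :
    (x >>> ((k : Nat) : Int)).land 1 = if x.testBit k then 1 else 0 := by
  rw [int_land_one, int_testBit_shiftRight]
  simp

-- popcount as the sum of the low k bits (for numbers below 2^k)
theorem pyPopCount_eq_nat (k : Nat) : ∀ n, n < 2 ^ k →
    pyPopCount n = ((List.range k).map (fun i => if n.testBit i then 1 else 0)).sum := by
  induction k with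
  | zero =>
    intro n hn
    interval_cases n
    simp [pyPopCount]
  | succ k ih =>
    intro n hn
    cases n with
    | zero => simp [pyPopCount, Nat.zero_testBit]
    | succ n =>
      rw [List.range_succ_eq_map, List.map_cons, List.sum_cons, List.map_map]
      have h2 : (n + 1) / 2 < 2 ^ k := by
        have : n + 1 < 2 ^ (k + 1) := hn
        rw [pow_succ] at this
        omega
      have hmap : ((List.range k).map ((fun i => if (n+1).testBit i then 1 else 0) ∘ Nat.succ))
          = (List.range k).map (fun i => if ((n+1)/2).testBit i then 1 else 0) := by
        apply List.map_congr_left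
        intro i _
        simp only [Function.comp]
        rw [show Nat.succ i = i + 1 from rfl, Nat.testBit_add_one]
      rw [hmap, ← ih ((n+1)/2) h2]
      have hpc : pyPopCount (n+1) = (n + 1) % 2 + pyPopCount ((n + 1) / 2) := by
        simp [pyPopCount]
      rw [hpc, Nat.testBit_zero]
      rcases Nat.mod_two_eq_zero_or_one (n+1) with h | h <;> rw [h] <;> simp

theorem int_land_ofNat_nonneg (x : Int) (n : Nat) : 0 ≤ x.land (Int.ofNat n) := by
  cases x <;> simp [Int.land]

theorem int_toNat_testBit (y : Int) (h : 0 ≤ y) (i : Nat) : (y.toNat).testBit i = y.testBit i := by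
  obtain ⟨n, rfl⟩ := Int.eq_ofNat_of_zero_le h
  rfl

theorem mask_eq : (1 <<< (31 : Int)) - 1 = Int.ofNat (2 ^ 31 - 1) := by decide

theorem mask_testBit (i : Nat) : ((1 <<< (31 : Int)) - 1).testBit i = decide (i < 31) := by
  rw [mask_eq]
  show (Nat.testBit (2 ^ 31 - 1) i) = decide (i < 31)
  exact Nat.testBit_two_pow_sub_one 31 i

-- popcount of a 31-bit-masked integer as the sum of its low 31 bits
theorem popcount_mask (x : Int) :
    (pyPopCount ((x.land ((1 <<< (31 : Int)) - 1)).toNat) : Int)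
      = ((List.range 31).map (fun i => if x.testBit i then (1 : Int) else 0)).sum := by
  have hnn : 0 ≤ x.land ((1 <<< (31 : Int)) - 1) := by
    rw [mask_eq]; exact int_land_ofNat_nonneg x _
  have hbit : ∀ i, ((x.land ((1 <<< (31 : Int)) - 1)).toNat).testBit i
      = (x.testBit i && decide (i < 31)) := by
    intro i
    rw [int_toNat_testBit _ hnn, Int.testBit_land, mask_testBit]
  have hlt : ((x.land ((1 <<< (31 : Int)) - 1)).toNat) < 2 ^ 31 := by
    apply Nat.lt_pow_two_of_testBit
    intro i hi
    rw [hbit i]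
    simp [Nat.not_lt.mpr hi]
  rw [pyPopCount_eq_nat 31 _ hlt, Nat.cast_list_sum, List.map_map]
  congr 1
  apply List.map_congr_left
  intro i hi
  have : i < 31 := List.mem_range.mp hi
  simp [Function.comp, hbit i, this]

-- A's loop as a sum over the 31 bit positions of the three per-bit flip indicators
theorem minFlips2_as_sum (a b c : Int) : minFlips2 a b c = ((List.range 31).map (fun k =>
    (if a.testBit k && !c.testBit k then (1:Int) else 0)
    + ((if b.testBit k && !c.testBit k then (1:Int) else 0)
      + (if (!a.testBit k && !b.testBit k) && c.testBit k then (1:Int) else 0)))).sum := by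
  unfold minFlips2
  rw [PySem.List.pyRange_one, show ((31:Int) - 0).toNat = 31 by decide, List.foldl_map]
  rw [PySem.List.foldl_congr_mem _ _ (fun flips k =>
      flips + ((if a.testBit k && !c.testBit k then (1:Int) else 0)
        + ((if b.testBit k && !c.testBit k then (1:Int) else 0)
          + (if (!a.testBit k && !b.testBit k) && c.testBit k then (1:Int) else 0)))) 0 ?_]
  · rw [PySem.List.foldl_add, zero_add]
  · intro acc k _
    simp only [zero_add, shift_land_one]
    rcases ha : a.testBit k <;> rcases hb : b.testBit k <;> rcases hc : c.testBit k <;>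
      all_goals simp
    all_goals ring

-- B as the same three per-bit sums
theorem minFlips2_alt_as_sum (a b c : Int) : minFlips2_alt a b c
    = ((List.range 31).map (fun k => if a.testBit k && !c.testBit k then (1:Int) else 0)).sum
    + (((List.range 31).map (fun k => if b.testBit k && !c.testBit k then (1:Int) else 0)).sum
      + ((List.range 31).map (fun k => if (!a.testBit k && !b.testBit k) && c.testBit k then (1:Int) else 0)).sum) := by
  show (pyPopCount ((a.land c.lnot).land _).toNat : Int)
      + (pyPopCount ((b.land c.lnot).land _).toNat : Int)
      + (pyPopCount (((a.lnot.land b.lnot).land c).land _).toNat : Int) = _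
  rw [popcount_mask, popcount_mask, popcount_mask]
  have e1 : ∀ x y : Int, ∀ i, (x.land y.lnot).testBit i = (x.testBit i && !y.testBit i) := by
    intro x y i; rw [Int.testBit_land, Int.testBit_lnot]
  have e2 : ∀ i, ((a.lnot.land b.lnot).land c).testBit i = ((!a.testBit i && !b.testBit i) && c.testBit i) := by
    intro i; rw [Int.testBit_land, Int.testBit_land, Int.testBit_lnot, Int.testBit_lnot]
  simp only [e1, e2]
  ring

-- ===== VERDICT (by name: the statement is the Claim_ definition above) =====
theorem minFlips2_spec : Claim_equal_minFlips2 := by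
  intro a b c _
  show minFlips2 a b c = minFlips2_alt a b c
  rw [minFlips2_as_sum, minFlips2_alt_as_sum]
  rw [← PySem.List.sum_map_add_int, ← PySem.List.sum_map_add_int]
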